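-- pv_equiv track=rewrite | github.com/melanikot-mipt/python_mipt_dafe_tasks | solutions/sem01/lesson05/task5.py | reg_validator
-- ===== SOURCE A (Python) =====
-- def reg_validator(reg_expr: str, text: str) -> bool:
--     for i in reg_expr:
--         if text == "":
--             return False
--
--         if i != "d" and i != "s" and i != "w":
--             if text == "" or i != text[0]:
--                 return False
--             else:
--                 text = text.replace(text[0], "", 1)
--
--         elif i == "w":
--             if not text[0].isalpha():
--                 return False
--             else:
--                 while len(text) != 0 and text[0].isalpha():
--                     text = text.replace(text[0], "", 1)
--
--         elif i == "d":
--             if not text[0].isdigit():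
--                 return False
--             else:
--                 while len(text) != 0 and text[0].isdigit():
--                     text = text.replace(text[0], "", 1)
--
--         elif i == "s":
--             if not text[0].isalnum():
--                 return False
--             else:
--                 while len(text) != 0 and text[0].isalnum():
--                     text = text.replace(text[0], "", 1)
--
--     if text != "":
--         return False
--
--     return True
-- ===== SOURCE B (Python) =====
-- def reg_validator(reg_expr: str, text: str) -> bool:
--     n = len(text)
--     j = 0
--     for c in reg_expr:
--         if j >= n:
--             return False
--         ch = text[j]
--         if c == "w":
--             if not ch.isalpha():
--                 return False
--             while j < n and text[j].isalpha():
--                 j += 1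
--         elif c == "d":
--             if not ch.isdigit():
--                 return False
--             while j < n and text[j].isdigit():
--                 j += 1
--         elif c == "s":
--             if not ch.isalnum():
--                 return False
--             while j < n and text[j].isalnum():
--                 j += 1
--         else:
--             if ch != c:
--                 return False
--             j += 1
--     return j == n
-- ===== Notes on version B (the rewrite author's own statement) =====
-- stated objective: faster
-- what changed: B walks the text with a single integer index pointer (one pass, no allocation) instead of A's repeated text.replace(text[0], '', 1) which rebuilds the whole remaining string once per consumed character.
import Mathlib
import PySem

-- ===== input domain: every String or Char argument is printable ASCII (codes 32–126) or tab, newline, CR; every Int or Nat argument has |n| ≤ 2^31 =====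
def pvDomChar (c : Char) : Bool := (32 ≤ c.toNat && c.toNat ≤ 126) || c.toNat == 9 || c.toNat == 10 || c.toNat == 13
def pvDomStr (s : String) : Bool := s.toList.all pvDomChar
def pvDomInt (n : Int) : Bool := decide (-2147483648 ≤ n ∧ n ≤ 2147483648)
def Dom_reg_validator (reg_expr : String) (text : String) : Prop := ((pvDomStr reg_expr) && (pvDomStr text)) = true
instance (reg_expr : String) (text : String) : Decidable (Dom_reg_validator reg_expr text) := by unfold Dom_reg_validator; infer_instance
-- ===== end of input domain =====

-- B replaces A's per-character text.replace(text[0], "", 1) string rebuilds by a single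
-- integer index pointer into the unchanged text (objective: faster, O(n+m) vs O(n*m)).

-- ===== PORT A =====
-- text.replace(x, "", 1): remove the first occurrence of x (exact for a one-char pattern and empty replacement)
def pyReplace1 : List Char → Char → List Char
  | [], _ => []
  | a :: rest, x => if a == x then rest else a :: pyReplace1 rest x

theorem pyReplace1_cons_self (h : Char) (rest : List Char) :
    pyReplace1 (h :: rest) h = rest := by simp [pyReplace1]

-- 'while len(text) != 0 and p(text[0]): text = text.replace(text[0], "", 1)'
def regAWhile (p : Char → Bool) : List Char → List Char
  | [] => []
  | h :: rest =>
    if p h then regAWhile p (pyReplace1 (h :: rest) h) else h :: rest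
termination_by t => t.length
decreasing_by simp [pyReplace1_cons_self]

-- the 'for i in reg_expr' loop of A, carrying the shrinking text
def regAGo : List Char → List Char → Bool
  | [], t => t == []          -- after the loop: 'if text != "": return False; return True'
  | _ :: _, [] => false       -- 'if text == "": return False'
  | c :: rs, h :: rest =>
      if c != 'd' && c != 's' && c != 'w' then
        if c != h then false
        else regAGo rs (pyReplace1 (h :: rest) h)
      else if c == 'w' then
        if !(PySem.Chars.isalpha h) then false
        else regAGo rs (regAWhile PySem.Chars.isalpha (h :: rest))
      else if c == 'd' then
        if !(PySem.Chars.isdigit h) then false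
        else regAGo rs (regAWhile PySem.Chars.isdigit (h :: rest))
      else
        if !(PySem.Chars.isalnum h) then false
        else regAGo rs (regAWhile PySem.Chars.isalnum (h :: rest))

def reg_validator (reg_expr : String) (text : String) : Bool :=
  regAGo reg_expr.toList text.toList

-- ===== PORT B =====
-- 'while j < n and p(text[j]): j += 1'
def regBSkip (p : Char → Bool) (t : List Char) (j : Nat) : Nat :=
  match hx : t[j]? with
  | some ch => if p ch then regBSkip p t (j + 1) else j
  | none => j
termination_by t.length - j
decreasing_by
  have := (List.getElem?_eq_some_iff.mp hx).1
  omega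

-- the 'for c in reg_expr' loop of B, carrying the index pointer j
def regBGo (t : List Char) : List Char → Nat → Bool
  | [], j => j == t.length     -- 'return j == n'
  | c :: rs, j =>
    if t.length ≤ j then false -- 'if j >= n: return False'
    else
      let ch := t.getD j ' '   -- ch = text[j]; the guard j < n makes this exactly text[j]
      if c == 'w' then
        if !(PySem.Chars.isalpha ch) then false
        else regBGo t rs (regBSkip PySem.Chars.isalpha t j)
      else if c == 'd' then
        if !(PySem.Chars.isdigit ch) then false
        else regBGo t rs (regBSkip PySem.Chars.isdigit t j)
      else if c == 's' then
        if !(PySem.Chars.isalnum ch) then false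
        else regBGo t rs (regBSkip PySem.Chars.isalnum t j)
      else
        if ch != c then false
        else regBGo t rs (j + 1)

def reg_validator_alt (reg_expr : String) (text : String) : Bool :=
  regBGo text.toList reg_expr.toList 0

-- ===== PRECONDITION & SPEC =====
def Spec_reg_validator (reg_expr : String) (text : String) (out : Bool) : Prop := out = reg_validator_alt reg_expr text
instance (reg_expr : String) (text : String) (out : Bool) : Decidable (Spec_reg_validator reg_expr text out) := by unfold Spec_reg_validator; infer_instance

-- ===== CLAIM (what is proved, stated in full; the proofs are below) =====
def Claim_equal_reg_validator : Prop := ∀ (reg_expr : String) (text : String), Dom_reg_validator reg_expr text → Spec_reg_validator reg_expr text (reg_validator reg_expr text)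

-- ===== LEMMAS AND PROOFS =====

theorem regBSkip_le (p : Char → Bool) (t : List Char) :
    ∀ j, j ≤ t.length → regBSkip p t j ≤ t.length := by
  intro j hj
  fun_induction regBSkip p t j with
  | case1 j ch hx hp ih =>
      exact ih (by have := (List.getElem?_eq_some_iff.mp hx).1; omega)
  | case2 j ch hx hp => exact hj
  | case3 j hx => exact hj

theorem regAWhile_eq_skip (p : Char → Bool) (t : List Char) :
    ∀ j, j ≤ t.length → regAWhile p (t.drop j) = t.drop (regBSkip p t j) := by
  intro j hj
  fun_induction regBSkip p t j with
  | case1 j ch hx hp ih =>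
      have hlt := (List.getElem?_eq_some_iff.mp hx).1
      have hdrop : t.drop j = t[j] :: t.drop (j + 1) := List.drop_eq_getElem_cons hlt
      have hch : t[j] = ch := (List.getElem?_eq_some_iff.mp hx).2
      rw [hdrop, hch, regAWhile, if_pos hp, pyReplace1_cons_self]
      exact ih (by omega)
  | case2 j ch hx hp =>
      have hlt := (List.getElem?_eq_some_iff.mp hx).1
      have hdrop : t.drop j = t[j] :: t.drop (j + 1) := List.drop_eq_getElem_cons hlt
      have hch : t[j] = ch := (List.getElem?_eq_some_iff.mp hx).2
      rw [hdrop, hch, regAWhile, if_neg (by simp [hp])]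
  | case3 j hx =>
      have hlen : t.length ≤ j := List.getElem?_eq_none_iff.mp hx
      have hnil : t.drop j = [] := List.drop_eq_nil_of_le hlen
      rw [hnil]; simp [regAWhile]

theorem regAGo_eq_regBGo (t : List Char) :
    ∀ rs j, j ≤ t.length → regAGo rs (t.drop j) = regBGo t rs j := by
  intro rs
  induction rs with
  | nil =>
      intro j hj
      show (t.drop j == []) = (j == t.length)
      rcases Nat.eq_or_lt_of_le hj with h | h
      · simp [h, List.drop_length]
      · have hdrop : t.drop j = t[j] :: t.drop (j + 1) := List.drop_eq_getElem_cons h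
        have h1 : (t.drop j == ([] : List Char)) = false := by rw [hdrop]; rfl
        have h2 : (j == t.length) = false := by
          simp only [beq_eq_false_iff_ne]; omega
        rw [h1, h2]
  | cons c rs ih =>
      intro j hj
      rcases Nat.eq_or_lt_of_le hj with h | h
      · have hnil : t.drop j = [] := by rw [h]; exact List.drop_length
        rw [regBGo, if_pos (le_of_eq h.symm), hnil, regAGo]
      · have hdrop : t.drop j = t[j] :: t.drop (j + 1) := List.drop_eq_getElem_cons h
        have hg : ¬ (t.length ≤ j) := by omega
        have hgd : t.getD j ' ' = t[j] := List.getD_eq_getElem t ' ' h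
        have hWhile : ∀ p : Char → Bool,
            regAWhile p (t[j] :: t.drop (j + 1)) = t.drop (regBSkip p t j) := by
          intro p; rw [← hdrop]; exact regAWhile_eq_skip p t j hj
        have hIH : ∀ p : Char → Bool,
            regAGo rs (t.drop (regBSkip p t j)) = regBGo t rs (regBSkip p t j) :=
          fun p => ih _ (regBSkip_le p t j hj)
        rw [hdrop, regAGo, regBGo, if_neg hg]
        simp only [hgd, pyReplace1_cons_self]
        split_ifs <;>
          first
            | rfl
            | (rw [hWhile _]; exact hIH _)
            | (exact ih _ (by omega))
            | simp_all

-- ===== VERDICT (by name: the statement is the Claim_ definition above) =====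
theorem reg_validator_spec : Claim_equal_reg_validator := by
  intro reg_expr text _
  show reg_validator reg_expr text = reg_validator_alt reg_expr text
  unfold reg_validator reg_validator_alt
  have := regAGo_eq_regBGo text.toList reg_expr.toList 0 (Nat.zero_le _)
  simpa using this
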